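-- pv_equiv track=rewrite | github.com/goelhardik/programming | hackerrank/angry_children_2/sol.py | find_min_abs_sum
-- ===== SOURCE A (Python) =====
-- def find_min_abs_sum(n, k, nums):
--     # minimum unfairness can only be obtained using contiguous elements in sorted array
--     nums.sort()
--     unfair = 0
--     runsum = nums[0]
--     # find unfairness for first k elements
--     for i in range(1, k):
--         unfair += i * nums[i] - runsum
--         runsum += nums[i]
--     minun = unfair
--     # update unfairness for all remaining combinations in O(1)
--     for i in range(k, n):
--         runsum -= nums[i - k]
--         unfair += (k - 1) * (nums[i] + nums[i - k]) - 2 * runsum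
--         minun = min(minun, unfair)
--         runsum += nums[i]
--
--     return minun
-- ===== SOURCE B (Python) =====
-- def find_min_abs_sum(n, k, nums):
--     # Sort in place (same observable mutation as the original), then evaluate each
--     # sorted k-window directly from two prefix tables instead of an incremental update.
--     nums.sort()
--     P = [0]  # P[t] = nums[0] + ... + nums[t-1]
--     Q = [0]  # Q[t] = sum of s * nums[s] for s < t
--     for s, x in enumerate(nums):
--         P.append(P[-1] + x)
--         Q.append(Q[-1] + s * x)
--     best = None
--     # the scan always evaluates at least the first window (A does too when n <= k)
--     for i in range(max(n - k + 1, 1)):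
--         w = P[i + k] - P[i]
--         t = (Q[i + k] - Q[i]) - i * w
--         u = 2 * t - (k - 1) * w
--         if best is None or u < best:
--             best = u
--     return best
-- ===== Notes on version B (the rewrite author's own statement) =====
-- stated objective: alternative
-- what changed: Replaces A's incremental sliding-window update of a running sum and unfairness with two precomputed prefix tables (plain and index-weighted prefix sums) from which each sorted k-window's pairwise-difference sum is evaluated by a closed formula, taking the minimum over windows.
-- outside the precondition, e.g. on find_min_abs_sum(2, 0, [3, 1]): A returns -4, B returns 0; on find_min_abs_sum(2, -1, [3, 1, 2]): A returns -24, B returns 0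
import Mathlib
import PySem

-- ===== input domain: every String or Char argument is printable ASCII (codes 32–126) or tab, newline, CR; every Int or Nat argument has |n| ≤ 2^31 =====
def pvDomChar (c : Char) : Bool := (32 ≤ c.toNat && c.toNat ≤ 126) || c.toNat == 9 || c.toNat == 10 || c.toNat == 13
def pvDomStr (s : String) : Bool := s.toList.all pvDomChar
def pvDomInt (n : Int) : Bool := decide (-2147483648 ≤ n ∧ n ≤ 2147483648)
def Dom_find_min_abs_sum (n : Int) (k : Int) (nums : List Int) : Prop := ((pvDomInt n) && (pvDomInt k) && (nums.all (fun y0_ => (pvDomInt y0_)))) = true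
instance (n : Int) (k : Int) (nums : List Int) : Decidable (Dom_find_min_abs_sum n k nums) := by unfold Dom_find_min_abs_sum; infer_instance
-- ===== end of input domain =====

-- B replaces A's incremental sliding-window update with prefix tables and a per-window
-- closed formula (objective: alternative). Both sort the list; A mutates its argument in
-- place and the equivalence is about the return value only (B performs the same sort).

-- ===== PORT A =====
-- literal transliteration of A: sort, incremental first-window unfairness, then O(1) slide updates
def find_min_abs_sum (n : Int) (k : Int) (nums : List Int) : Int :=
  let a := PySem.List.sorted nums (fun x => x) false
  let g : Int → Int := fun i => PySem.List.pyGetD a i 0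
  let s1 := (PySem.List.pyRange 1 k 1).foldl
      (fun (st : Int × Int) i => (st.1 + i * g i - st.2, st.2 + g i)) (0, g 0)
  let s2 := (PySem.List.pyRange k n 1).foldl
      (fun (st : Int × Int × Int) i =>
        let r1 := st.2.2 - g (i - k)
        let u1 := st.2.1 + (k - 1) * (g i + g (i - k)) - 2 * r1
        (min st.1 u1, u1, r1 + g i)) (s1.1, s1.1, s1.2)
  s2.1

-- ===== PORT B =====
-- literal transliteration of B: sort, build prefix tables P and Q by appending, then scan windows
def find_min_abs_sum_alt (n : Int) (k : Int) (nums : List Int) : Int :=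
  let a := PySem.List.sorted nums (fun x => x) false
  let pq := (PySem.List.enumerate a 0).foldl
      (fun (pq : List Int × List Int) sx =>
        (pq.1 ++ [PySem.List.pyGetD pq.1 (-1) 0 + sx.2],
         pq.2 ++ [PySem.List.pyGetD pq.2 (-1) 0 + sx.1 * sx.2])) ([0], [0])
  let best := (PySem.List.pyRange 0 (max (n - k + 1) 1) 1).foldl
      (fun (b : Option Int) i =>
        let w := PySem.List.pyGetD pq.1 (i + k) 0 - PySem.List.pyGetD pq.1 i 0
        let t := (PySem.List.pyGetD pq.2 (i + k) 0 - PySem.List.pyGetD pq.2 i 0) - i * w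
        let u := 2 * t - (k - 1) * w
        match b with
        | none => some u
        | some bv => if u < bv then some u else some bv) none
  best.getD 0

-- ===== PRECONDITION & SPEC =====
-- Pre_ excludes inputs where A raises IndexError (empty list, k > len(nums), or
-- n > len(nums) with n > k) and the degenerate k ≤ 0 case, where A's returned value is an
-- accident of Python's negative-index wraparound (see claim.json cites); B returns a
-- different value there.
def Pre_find_min_abs_sum (n : Int) (k : Int) (nums : List Int) : Prop :=
  1 ≤ k ∧ k ≤ nums.length ∧ (n ≤ nums.length ∨ n ≤ k)
instance (n : Int) (k : Int) (nums : List Int) : Decidable (Pre_find_min_abs_sum n k nums) := by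
  unfold Pre_find_min_abs_sum; infer_instance

def pvWitness_find_min_abs_sum : Int × Int × List Int := (3, 2, [5, 1, 4])

def Spec_find_min_abs_sum (n : Int) (k : Int) (nums : List Int) (out : Int) : Prop :=
  out = find_min_abs_sum_alt n k nums
instance (n : Int) (k : Int) (nums : List Int) (out : Int) : Decidable (Spec_find_min_abs_sum n k nums out) := by
  unfold Spec_find_min_abs_sum; infer_instance

-- ===== CLAIM (what is proved, stated in full; the proofs are below) =====
def Claim_equal_find_min_abs_sum : Prop := ∀ (n : Int) (k : Int) (nums : List Int), Dom_find_min_abs_sum n k nums → Pre_find_min_abs_sum n k nums → Spec_find_min_abs_sum n k nums (find_min_abs_sum n k nums)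

-- ===== LEMMAS AND PROOFS =====

def gfun (a : List Int) : Int → Int := fun i => PySem.List.pyGetD a i 0

-- plain and index-weighted window sums of g over [j, j+m)
def Sf (g : Int → Int) (j : Int) (m : Nat) : Int := ∑ t ∈ Finset.range m, g (j + t)
def Tf (g : Int → Int) (j : Int) (m : Nat) : Int := ∑ t ∈ Finset.range m, (t:Int) * g (j + t)
-- pairwise-difference sum of the sorted window [j, j+K)
def Wf (g : Int → Int) (K : Nat) (j : Int) : Int := 2 * Tf g j K - ((K:Int)-1) * Sf g j K

theorem Sf_succ (g : Int → Int) (j : Int) (m : Nat) : Sf g j (m+1) = Sf g j m + g (j + m) := by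
  unfold Sf; rw [Finset.sum_range_succ]

theorem Tf_succ (g : Int → Int) (j : Int) (m : Nat) : Tf g j (m+1) = Tf g j m + m * g (j + m) := by
  unfold Tf; rw [Finset.sum_range_succ]

theorem Sf_shift (g : Int → Int) (j : Int) (m : Nat) :
    Sf g (j+1) m = Sf g j m + g (j + m) - g j := by
  have h1 : Sf g j (m+1) = Sf g j m + g (j + m) := Sf_succ g j m
  have h2 : Sf g j (m+1) = g j + Sf g (j+1) m := by
    unfold Sf
    rw [Finset.sum_range_succ']
    have : ∀ t ∈ Finset.range m, g (j + ((t:Nat)+1:Nat)) = g ((j+1) + t) := by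
      intro t _; congr 1; push_cast; ring
    rw [Finset.sum_congr rfl this]
    push_cast
    ring_nf
  omega

theorem Tf_shift (g : Int → Int) (j : Int) (m : Nat) :
    Tf g (j+1) m = Tf g j m + m * g (j + m) - Sf g (j+1) m := by
  have h1 : Tf g j (m+1) = Tf g j m + m * g (j + m) := Tf_succ g j m
  have h2 : Tf g j (m+1) = Tf g (j+1) m + Sf g (j+1) m := by
    unfold Tf Sf
    rw [Finset.sum_range_succ']
    have : ∀ t ∈ Finset.range m, ((t:Nat)+1:Nat) * g (j + ((t:Nat)+1:Nat))
        = ((t:Int) * g ((j+1) + t) + g ((j+1) + t)) := by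
      intro t _
      have : j + ((t:Nat)+1:Nat) = (j+1) + (t:Int) := by push_cast; ring
      rw [this]; push_cast; ring
    rw [Finset.sum_congr rfl this, Finset.sum_add_distrib]
    simp
  omega

theorem Wf_shift (g : Int → Int) (K : Nat) (j : Int) :
    Wf g K (j+1) = Wf g K j + ((K:Int)-1) * (g (j + K) + g j) - 2 * (Sf g j K - g j) := by
  unfold Wf
  rw [Tf_shift, Sf_shift]
  ring

theorem Wf_zero_succ (g : Int → Int) (M : Nat) :
    Wf g (M+1) 0 = Wf g M 0 + M * g (0 + M) - Sf g 0 M := by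
  unfold Wf
  rw [Tf_succ, Sf_succ]
  push_cast; ring

-- ===== A-side loop lemmas =====
theorem loop1 (a : List Int) : ∀ (m : Nat),
    (PySem.List.pyRange 1 (1 + (m:Int)) 1).foldl
      (fun (st : Int × Int) i =>
        (st.1 + i * PySem.List.pyGetD a i 0 - st.2, st.2 + PySem.List.pyGetD a i 0))
      (0, PySem.List.pyGetD a 0 0)
    = (Wf (gfun a) (m+1) 0, Sf (gfun a) 0 (m+1)) := by
  intro m
  induction m with
  | zero =>
      rw [PySem.List.pyRange_one_eq_nil (by omega)]
      simp [Wf, Sf, Tf, gfun, PySem.List.pyGetD_zero]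
  | succ m ih =>
      rw [show (1 + ((m+1:Nat):Int)) = (1 + (m:Int)) + 1 by push_cast; ring]
      rw [PySem.List.pyRange_one_succ_right (by omega), List.foldl_append, ih]
      simp only [List.foldl_cons, List.foldl_nil]
      have hg : gfun a (0 + ((m+1:Nat):Int)) = PySem.List.pyGetD a (1 + (m:Int)) 0 := by
        simp only [gfun]; congr 1; push_cast; ring
      conv_rhs => rw [show m+1+1 = (m+1)+1 from rfl, Wf_zero_succ, Sf_succ]
      rw [hg, Sf_succ (gfun a) 0 m]
      have hg2 : gfun a (0 + (m:Int)) = gfun a (m:Int) := by norm_num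
      rw [hg2]
      simp only [Prod.mk.injEq]
      refine ⟨by push_cast; ring, ?_⟩
      conv_rhs => rw [show m+1+1 = (m+1)+1 from rfl, Sf_succ]
      rw [hg, Sf_succ (gfun a) 0 m, hg2]

theorem loop2 (a : List Int) (K : Nat) (x0 : Int) : ∀ (c : Nat),
    (PySem.List.pyRange ((K:Int)) ((K:Int) + (c:Int)) 1).foldl
      (fun (st : Int × Int × Int) i =>
        (min st.1 (st.2.1 + ((K:Int) - 1) * (PySem.List.pyGetD a i 0 + PySem.List.pyGetD a (i - (K:Int)) 0) - 2 * (st.2.2 - PySem.List.pyGetD a (i - (K:Int)) 0)),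
         st.2.1 + ((K:Int) - 1) * (PySem.List.pyGetD a i 0 + PySem.List.pyGetD a (i - (K:Int)) 0) - 2 * (st.2.2 - PySem.List.pyGetD a (i - (K:Int)) 0),
         st.2.2 - PySem.List.pyGetD a (i - (K:Int)) 0 + PySem.List.pyGetD a i 0))
      (x0, Wf (gfun a) K 0, Sf (gfun a) 0 K)
    = ((PySem.List.pyRange 1 ((c:Int)+1) 1).foldl (fun m j => min m (Wf (gfun a) K j)) x0,
       Wf (gfun a) K (c:Int), Sf (gfun a) (c:Int) K) := by
  intro c
  induction c with
  | zero =>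
      rw [show ((K:Int) + ((0:Nat):Int)) = (K:Int) by push_cast; ring]
      rw [PySem.List.pyRange_one_eq_nil (by omega),
          PySem.List.pyRange_one_eq_nil (by norm_num)]
      simp
  | succ c ih =>
      rw [show ((K:Int) + ((c+1:Nat):Int)) = ((K:Int) + (c:Int)) + 1 by push_cast; ring]
      rw [PySem.List.pyRange_one_succ_right (by omega), List.foldl_append, ih]
      simp only [List.foldl_cons, List.foldl_nil]
      rw [show ((K:Int) + (c:Int) - (K:Int)) = (c:Int) by ring]
      have hw := Wf_shift (gfun a) K (c:Int)
      have hs := Sf_shift (gfun a) (c:Int) K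
      simp only [gfun] at hw hs
      have hrr : (PySem.List.pyRange 1 (((c:Int) + 1) + 1) 1).foldl
            (fun m j => min m (Wf (gfun a) K j)) x0
          = min ((PySem.List.pyRange 1 ((c:Int) + 1) 1).foldl
              (fun m j => min m (Wf (gfun a) K j)) x0) (Wf (gfun a) K ((c:Int)+1)) := by
        rw [PySem.List.pyRange_one_succ_right (by omega), List.foldl_append]
        simp only [List.foldl_cons, List.foldl_nil]
      conv_rhs => rw [show (((c+1:Nat)):Int) = (c:Int) + 1 by push_cast; ring]
      rw [hrr, hw, hs]
      rw [show ((c:Int) + (K:Int)) = ((K:Int) + (c:Int)) by ring]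
      simp only [Prod.mk.injEq]
      exact ⟨trivial, trivial, by ring⟩

-- ===== B-side lemmas =====
def scanP : List Int → Int → List Int
  | [], _ => []
  | x :: t, acc => (acc + x) :: scanP t (acc + x)

def scanQ : List Int → Int → Int → List Int
  | [], _, _ => []
  | x :: t, s, acc => (acc + s * x) :: scanQ t (s+1) (acc + s * x)

theorem foldPQ : ∀ (xs : List Int) (s : Int) (p q : List Int) (x0 y0 : Int),
    (PySem.List.enumerate xs s).foldl
      (fun (pq : List Int × List Int) sx =>
        (pq.1 ++ [PySem.List.pyGetD pq.1 (-1) 0 + sx.2],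
         pq.2 ++ [PySem.List.pyGetD pq.2 (-1) 0 + sx.1 * sx.2]))
      (p ++ [x0], q ++ [y0])
    = (p ++ x0 :: scanP xs x0, q ++ y0 :: scanQ xs s y0) := by
  intro xs
  induction xs with
  | nil => intro s p q x0 y0; simp [PySem.List.enumerate_nil, scanP, scanQ]
  | cons x t ih =>
      intro s p q x0 y0
      rw [PySem.List.enumerate_cons, List.foldl_cons]
      simp only [PySem.List.pyGetD_neg_one_append_singleton]
      rw [ih (s+1) (p ++ [x0]) (q ++ [y0]) (x0 + x) (y0 + s * x)]
      simp [scanP, scanQ]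

theorem getD_scanP : ∀ (xs : List Int) (acc : Int) (t : Nat), t < xs.length →
    (scanP xs acc).getD t 0 = acc + ∑ s ∈ Finset.range (t+1), xs.getD s 0 := by
  intro xs
  induction xs with
  | nil => intro acc t ht; simp at ht
  | cons x xs ih =>
      intro acc t ht
      cases t with
      | zero => simp [scanP]
      | succ t =>
          have ht' : t < xs.length := by simpa using ht
          simp only [scanP, List.getD_cons_succ]
          rw [ih (acc + x) t ht']
          conv_rhs => rw [Finset.sum_range_succ']
          simp only [List.getD_cons_succ, List.getD_cons_zero]
          ring

theorem getD_scanQ : ∀ (xs : List Int) (s0 acc : Int) (t : Nat), t < xs.length →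
    (scanQ xs s0 acc).getD t 0 = acc + ∑ u ∈ Finset.range (t+1), (s0 + u) * xs.getD u 0 := by
  intro xs
  induction xs with
  | nil => intro s0 acc t ht; simp at ht
  | cons x xs ih =>
      intro s0 acc t ht
      cases t with
      | zero => simp [scanQ]
      | succ t =>
          have ht' : t < xs.length := by simpa using ht
          simp only [scanQ, List.getD_cons_succ]
          rw [ih (s0+1) (acc + s0 * x) t ht']
          conv_rhs => rw [Finset.sum_range_succ']
          simp only [List.getD_cons_succ, List.getD_cons_zero]
          have : ∀ u ∈ Finset.range (t+1), (s0 + 1 + (u:Int)) * xs.getD u 0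
              = (s0 + ((u+1:Nat):Int)) * xs.getD u 0 := by
            intro u _; push_cast; ring
          rw [Finset.sum_congr rfl this]
          push_cast; ring

theorem Pfun (a : List Int) (t : Nat) (ht : t ≤ a.length) :
    (0 :: scanP a 0).getD t 0 = ∑ s ∈ Finset.range t, a.getD s 0 := by
  cases t with
  | zero => simp
  | succ t => rw [List.getD_cons_succ, getD_scanP a 0 t (by omega)]; simp

theorem Qfun (a : List Int) (t : Nat) (ht : t ≤ a.length) :
    (0 :: scanQ a 0 0).getD t 0 = ∑ s ∈ Finset.range t, (s:Int) * a.getD s 0 := by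
  cases t with
  | zero => simp
  | succ t => rw [List.getD_cons_succ, getD_scanQ a 0 0 t (by omega)]; simp

theorem Pdiff (a : List Int) (iN K : Nat) :
    (∑ s ∈ Finset.range (iN+K), a.getD s 0) - (∑ s ∈ Finset.range iN, a.getD s 0)
    = Sf (gfun a) (iN:Int) K := by
  rw [Finset.sum_range_add]
  unfold Sf
  have : ∀ t ∈ Finset.range K, a.getD (iN + t) 0 = gfun a ((iN:Int) + t) := by
    intro t _
    simp only [gfun]
    rw [show ((iN:Int) + (t:Int)) = (((iN+t : Nat)):Int) by push_cast; ring,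
        PySem.List.pyGetD_natCast]
  rw [Finset.sum_congr rfl this]
  ring

theorem Qdiff (a : List Int) (iN K : Nat) :
    (∑ s ∈ Finset.range (iN+K), (s:Int) * a.getD s 0) - (∑ s ∈ Finset.range iN, (s:Int) * a.getD s 0)
    = (iN:Int) * Sf (gfun a) (iN:Int) K + Tf (gfun a) (iN:Int) K := by
  rw [Finset.sum_range_add]
  unfold Sf Tf
  have : ∀ t ∈ Finset.range K, (((iN+t:Nat)):Int) * a.getD (iN + t) 0
      = (iN:Int) * gfun a ((iN:Int) + t) + (t:Int) * gfun a ((iN:Int) + t) := by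
    intro t _
    simp only [gfun]
    rw [show ((iN:Int) + (t:Int)) = (((iN+t : Nat)):Int) by push_cast; ring,
        PySem.List.pyGetD_natCast]
    push_cast; ring
  rw [Finset.sum_congr rfl this, Finset.sum_add_distrib, ← Finset.mul_sum]
  ring

theorem Bval (a : List Int) (K iN : Nat) (h : iN + K ≤ a.length) :
    2 * (((0 :: scanQ a 0 0).getD (iN+K) 0 - (0 :: scanQ a 0 0).getD iN 0)
          - (iN:Int) * ((0 :: scanP a 0).getD (iN+K) 0 - (0 :: scanP a 0).getD iN 0))
      - ((K:Int) - 1) * ((0 :: scanP a 0).getD (iN+K) 0 - (0 :: scanP a 0).getD iN 0)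
    = Wf (gfun a) K (iN:Int) := by
  rw [Pfun a (iN+K) h, Pfun a iN (by omega), Qfun a (iN+K) h, Qfun a iN (by omega),
      Pdiff, Qdiff]
  unfold Wf
  ring

theorem optfold (V : Int → Int) : ∀ (l : List Int) (x : Int),
    l.foldl (fun b i => match b with
      | none => some (V i)
      | some bv => if V i < bv then some (V i) else some bv) (some x)
    = some (l.foldl (fun m i => min m (V i)) x) := by
  intro l
  induction l with
  | nil => intro x; simp
  | cons i t ih =>
      intro x
      simp only [List.foldl_cons]
      rw [show (if V i < x then some (V i) else some x) = some (min x (V i)) by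
        rw [min_def]; split_ifs <;> first | rfl | (exfalso; omega)]
      exact ih (min x (V i))

theorem loop1' (a : List Int) (K : Nat) (hK : 1 ≤ K) :
    (PySem.List.pyRange 1 (K:Int) 1).foldl
      (fun (st : Int × Int) i =>
        (st.1 + i * PySem.List.pyGetD a i 0 - st.2, st.2 + PySem.List.pyGetD a i 0))
      (0, PySem.List.pyGetD a 0 0)
    = (Wf (gfun a) K 0, Sf (gfun a) 0 K) := by
  obtain ⟨m, rfl⟩ : ∃ m, K = m + 1 := ⟨K - 1, by omega⟩
  rw [show (((m+1:Nat)):Int) = 1 + (m:Int) by push_cast; ring]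
  exact loop1 a m

theorem foldPQ0 (xs : List Int) :
    (PySem.List.enumerate xs 0).foldl
      (fun (pq : List Int × List Int) sx =>
        (pq.1 ++ [PySem.List.pyGetD pq.1 (-1) 0 + sx.2],
         pq.2 ++ [PySem.List.pyGetD pq.2 (-1) 0 + sx.1 * sx.2]))
      ([0], [0])
    = (0 :: scanP xs 0, 0 :: scanQ xs 0 0) := by
  have := foldPQ xs 0 [] [] 0 0
  simpa using this

theorem pv_equiv_core (n k : Int) (nums : List Int)
    (hk1 : 1 ≤ k) (hkl : k ≤ nums.length) (hor : n ≤ nums.length ∨ n ≤ k) :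
    find_min_abs_sum n k nums = find_min_abs_sum_alt n k nums := by
  obtain ⟨K, rfl⟩ : ∃ K : Nat, k = (K:Int) := ⟨k.toNat, (Int.toNat_of_nonneg (by omega)).symm⟩
  by_cases hle : (K:Int) ≤ n
  · -- at least one slide position: the sliding scan visits windows 0..n-k
    have hnl : n ≤ nums.length := by omega
    obtain ⟨c, rfl⟩ : ∃ c : Nat, n = (K:Int) + (c:Int) := ⟨(n-(K:Int)).toNat, by omega⟩
    simp only [find_min_abs_sum, find_min_abs_sum_alt]
    set a := PySem.List.sorted nums (fun x => x) false with ha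
    have hal : a.length = nums.length := by
      rw [ha]; exact PySem.List.length_sorted nums (fun x => x) false
    have hKa : K + c ≤ a.length := by omega
    have hK1 : 1 ≤ K := by omega
    rw [loop1' a K hK1, foldPQ0 a]
    simp only []
    rw [loop2 a K (Wf (gfun a) K 0) c]
    simp only []
    rw [show max ((K:Int) + (c:Int) - (K:Int) + 1) 1 = (c:Int) + 1 by omega]
    have hU : ∀ i : Int, 0 ≤ i → i ≤ (c:Int) →
        2 * (PySem.List.pyGetD (0 :: scanQ a 0 0) (i + (K:Int)) 0 - PySem.List.pyGetD (0 :: scanQ a 0 0) i 0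
             - i * (PySem.List.pyGetD (0 :: scanP a 0) (i + (K:Int)) 0 - PySem.List.pyGetD (0 :: scanP a 0) i 0))
          - ((K:Int) - 1) * (PySem.List.pyGetD (0 :: scanP a 0) (i + (K:Int)) 0 - PySem.List.pyGetD (0 :: scanP a 0) i 0)
        = Wf (gfun a) K i := by
      intro i h0 hc'
      obtain ⟨iN, rfl⟩ : ∃ iN : Nat, i = (iN:Int) := ⟨i.toNat, (Int.toNat_of_nonneg h0).symm⟩
      rw [show ((iN:Int) + (K:Int)) = ((iN + K : Nat):Int) by push_cast; ring]
      rw [PySem.List.pyGetD_natCast, PySem.List.pyGetD_natCast,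
          PySem.List.pyGetD_natCast, PySem.List.pyGetD_natCast]
      exact Bval a K iN (by omega)
    rw [PySem.List.pyRange_one_cons (by omega : (0:Int) < (c:Int)+1)]
    simp only [List.foldl_cons]
    rw [optfold]
    simp only [Option.getD_some]
    rw [hU 0 le_rfl (by omega)]
    refine (PySem.List.foldl_congr_mem _ _ _ _ ?_).symm
    intro acc i hi
    obtain ⟨h1, h2⟩ := PySem.List.mem_pyRange_one.mp hi
    rw [hU i (by omega) (by omega)]

  · -- n < k: A's sliding loop is empty; B evaluates exactly the first window
    have hgt : n < (K:Int) := by omega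
    simp only [find_min_abs_sum, find_min_abs_sum_alt]
    set a := PySem.List.sorted nums (fun x => x) false with ha
    have hal : a.length = nums.length := by
      rw [ha]; exact PySem.List.length_sorted nums (fun x => x) false
    have hK1 : 1 ≤ K := by omega
    rw [loop1' a K hK1, foldPQ0 a]
    simp only []
    rw [PySem.List.pyRange_one_eq_nil (by omega : n ≤ (K:Int))]
    simp only [List.foldl_nil]
    rw [show max (n - (K:Int) + 1) 1 = (1:Int) by omega]
    rw [show (PySem.List.pyRange 0 1 1) = [0] from PySem.List.pyRange_one_singleton 0]
    simp only [List.foldl_cons, List.foldl_nil, Option.getD_some]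
    have h0 : ((0:Int) + (K:Int)) = ((K:Nat):Int) := by ring
    rw [h0, PySem.List.pyGetD_natCast, PySem.List.pyGetD_natCast,
        PySem.List.pyGetD_zero, PySem.List.pyGetD_zero]
    have := Bval a K 0 (by omega)
    simpa using this.symm

-- ===== VERDICT (by name: the statement is the Claim_ definition above) =====
theorem find_min_abs_sum_spec : Claim_equal_find_min_abs_sum := by
  intro n k nums _ hpre
  obtain ⟨hk1, hkl, hor⟩ := hpre
  unfold Spec_find_min_abs_sum
  exact pv_equiv_core n k nums hk1 hkl hor
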